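-- pv_equiv track=rewrite | github.com/InfFMS/demoege-2026-Natalia01210 | task 5.py | F
-- ===== SOURCE A (Python) =====
-- def F(N):
--     R = ''
--     n = N
--     while n > 0:
--         R = R + str(n%2)
--         n //= 2
--     R = R[::-1]
--     if N % 3 == 0:
--         R = R + R[len(R)-3:len(R)]
--     else:
--         r = N % 3
--         r *= 3
--         q = ''
--         Q = r
--         while Q > 0:
--             q = q + str(Q % 2)
--             Q //= 2
--         q = q[::-1]
--         R = R + q
--     s = 0
--     i = 0
--     R = int(R)
--     while (R > 0):
--         s += (R % 10) * 2 ** i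
--         i += 1
--         R //= 10
--     return s
-- ===== SOURCE B (Python) =====
-- def F(N):
--     # closed form: binary of N, appended suffix, reread in base 2 = N * 2**k + suffix
--     r = N % 3
--     if r == 1:
--         return N * 4 + 3
--     if r == 2:
--         return N * 8 + 6
--     k = min(N.bit_length(), 3)
--     return N * 2 ** k + N % 2 ** k
-- ===== Notes on version B (the rewrite author's own statement) =====
-- stated objective: simpler
-- what changed: All three digit loops plus the string building, reversal, slicing and int() re-parse are replaced by a branch on N % 3 and one closed-form expression N*2**k + suffix, since reading the decimal digits of the binary string in base 2 just recomputes int(R, 2); Pre_ restricts to positive N, the task's natural domain (binary encoding), outside which A raises ValueError on multiples of 3 and otherwise returns a magnitude-independent 3 or 6 from the empty binary string.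
-- intended difference: At N = 3 (the only positive N whose binary string is shorter than 3 while N % 3 == 0) A's slice R[len(R)-3:] wraps its negative start and appends only one character, returning 7; B appends the full min(bit_length,3)-bit suffix and returns 15, the intended value of the construction. — e.g. on F(3): A returns 7, B returns 15
-- outside the precondition, e.g. on F(-2): A returns 3, B returns -5; on F(-1): A returns 6, B returns -2; on F(-3): A raises ValueError, B returns -11
import Mathlib
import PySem

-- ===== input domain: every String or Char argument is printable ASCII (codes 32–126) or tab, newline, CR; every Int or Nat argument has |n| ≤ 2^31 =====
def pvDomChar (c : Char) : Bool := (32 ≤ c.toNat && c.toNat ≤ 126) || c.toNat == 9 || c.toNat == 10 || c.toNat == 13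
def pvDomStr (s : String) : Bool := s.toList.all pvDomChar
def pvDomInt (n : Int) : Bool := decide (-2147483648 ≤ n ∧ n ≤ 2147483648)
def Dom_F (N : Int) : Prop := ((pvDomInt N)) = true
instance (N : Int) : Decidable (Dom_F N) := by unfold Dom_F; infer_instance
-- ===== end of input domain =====

-- B replaces A's three digit loops, string building, reversal, slicing and int() re-parse
-- by a branch on N % 3 and one closed-form expression N * 2^k + suffix.

-- ===== PORT A =====

-- the two identical 'while x > 0: s = s + str(x % 2); x //= 2' loops of A
def pyBinRev (n : Int) (R : List Char) : List Char :=
  if 0 < n then pyBinRev (PySem.Int.floordiv n 2) (R ++ PySem.Int.toChars (PySem.Int.mod n 2)) else R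
termination_by n.toNat
decreasing_by
  rw [PySem.Int.floordiv_eq_ediv_of_pos (by norm_num : (0:Int) < 2)]
  omega

-- hand port of int(R), step for step: exact for the only shapes R takes in F — the empty
-- string (ValueError = none, excluded by Pre_F) and nonempty strings of decimal digits.
def pyParseDigits? (cs : List Char) : Option Int :=
  if cs.isEmpty then none
  else some (cs.foldl (fun a c => 10 * a + ((c.toNat : Int) - 48)) 0)

-- 'while R > 0: s += (R % 10) * 2 ** i; i += 1; R //= 10'
def pyDigitLoop (R : Int) (s : Int) (i : Nat) : Int :=
  if 0 < R then pyDigitLoop (PySem.Int.floordiv R 10) (s + PySem.Int.mod R 10 * 2 ^ i) (i + 1) else s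
termination_by R.toNat
decreasing_by
  rw [PySem.Int.floordiv_eq_ediv_of_pos (by norm_num : (0:Int) < 10)]
  omega

def F (N : Int) : Int :=
  let R0 := pyBinRev N []
  let R1 := (PySem.List.slice? R0 none none (-1)).getD []          -- R = R[::-1]
  let R2 :=
    if PySem.Int.mod N 3 = 0 then
      R1 ++ PySem.List.slice R1 (some ((R1.length : Int) - 3)) (some (R1.length : Int))
    else
      let r := PySem.Int.mod N 3 * 3
      let q := pyBinRev r []
      let q1 := (PySem.List.slice? q none none (-1)).getD []       -- q = q[::-1]
      R1 ++ q1
  let Rv := (pyParseDigits? R2).getD 0                             -- R = int(R); ValueError excluded by Pre_F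
  pyDigitLoop Rv 0 0

-- ===== PORT B =====

-- Python's int.bit_length()
def pyBitLength (n : Int) : Nat :=
  if n = 0 then 0 else n.natAbs.log2 + 1

def F_alt (N : Int) : Int :=
  let r := PySem.Int.mod N 3
  if r = 1 then N * 4 + 3
  else if r = 2 then N * 8 + 6
  else
    let k : Nat := min (pyBitLength N) 3
    N * 2 ^ k + PySem.Int.mod N (2 ^ k)

-- ===== PRECONDITION & SPEC =====
-- Pre_F restricts to positive N, the task's natural domain (binary encoding of N):
-- for N ≤ 0 the binary string is empty, so A raises ValueError (int('')) when N % 3 == 0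
-- and otherwise returns a magnitude-independent 3 or 6.
def Pre_F (N : Int) : Prop := 0 < N
instance (N : Int) : Decidable (Pre_F N) := by unfold Pre_F; infer_instance
def pvWitness_F : Int := 5

-- At N = 3 (the only positive N with N % 3 == 0 whose binary string is shorter than 3)
-- A's slice R[len(R)-3:] wraps its negative start and appends only one character, returning 7;
-- B appends the full min(bit_length, 3)-bit suffix and returns 15, the intended value.
def D_F (N : Int) : Prop := N = 3
instance (N : Int) : Decidable (D_F N) := by unfold D_F; infer_instance

def Spec_F (N : Int) (out : Int) : Prop := ¬ D_F N → out = F_alt N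
instance (N : Int) (out : Int) : Decidable (Spec_F N out) := by unfold Spec_F; infer_instance

def pvDiffWitness_F : Int := 3
def pvDiffWitnessOut_F : Int × Int := (7, 15)

-- ===== CLAIM (what is proved, stated in full; the proofs are below) =====
def Claim_unchanged_F : Prop := ∀ (N : Int), Dom_F N → Pre_F N → Spec_F N (F N)
def Claim_changed_F : Prop := Dom_F (pvDiffWitness_F) ∧ Pre_F (pvDiffWitness_F) ∧ D_F (pvDiffWitness_F) ∧ F (pvDiffWitness_F) = pvDiffWitnessOut_F.1 ∧ F_alt (pvDiffWitness_F) = pvDiffWitnessOut_F.2 ∧ pvDiffWitnessOut_F.1 ≠ pvDiffWitnessOut_F.2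
def Claim_exact_F : Prop := ∀ (N : Int), Dom_F N → Pre_F N → D_F N → F N ≠ F_alt N

-- ===== LEMMAS AND PROOFS =====

-- low-to-high binary digit characters of a natural number
def lbN (m : Nat) : List Char :=
  if m = 0 then [] else (if m % 2 = 1 then '1' else '0') :: lbN (m / 2)
termination_by m
decreasing_by omega

def dchar (c : Char) : Int := (c.toNat : Int) - 48
def bval (L : List Char) : Int := L.foldl (fun a c => 2 * a + dchar c) 0
def dval (L : List Char) : Int := L.foldl (fun a c => 10 * a + dchar c) 0
def IsBits (L : List Char) : Prop := ∀ c ∈ L, c = '0' ∨ c = '1'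

-- the value of the decimal digits of m reinterpreted in base 2
def gDec (m : Int) : Int :=
  if 0 < m then PySem.Int.mod m 10 + 2 * gDec (PySem.Int.floordiv m 10) else 0
termination_by m.toNat
decreasing_by
  rw [PySem.Int.floordiv_eq_ediv_of_pos (by norm_num : (0:Int) < 10)]
  omega

theorem pyBinRev_eq (n : Int) (R : List Char) : pyBinRev n R = R ++ lbN n.toNat := by
  induction n, R using pyBinRev.induct with
  | case1 n R h ih =>
    rw [pyBinRev, if_pos h, ih]
    rw [List.append_assoc]
    congr 1
    have hfd : PySem.Int.floordiv n 2 = n / 2 := PySem.Int.floordiv_eq_ediv_of_pos (by norm_num)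
    have hmd : PySem.Int.mod n 2 = n % 2 := PySem.Int.mod_eq_emod_of_pos (by norm_num)
    rw [hfd, hmd]
    conv_rhs => rw [lbN]
    have h0 : n.toNat ≠ 0 := by omega
    rw [if_neg h0]
    rcases Int.emod_two_eq_zero_or_one n with he | he
    · have h2 : n.toNat % 2 = 0 := by omega
      have h3 : (n / 2).toNat = n.toNat / 2 := by omega
      rw [he, h2, h3]
      have ht : PySem.Int.toChars 0 = ['0'] := rfl
      rw [ht]; simp
    · have h2 : n.toNat % 2 = 1 := by omega
      have h3 : (n / 2).toNat = n.toNat / 2 := by omega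
      rw [he, h2, h3]
      have ht : PySem.Int.toChars 1 = ['1'] := rfl
      rw [ht]; simp
  | case2 n R h =>
    rw [pyBinRev, if_neg h]
    have : n.toNat = 0 := by omega
    rw [this, lbN]
    simp

theorem foldl_bval (L : List Char) (a : Int) :
    L.foldl (fun x c => 2 * x + dchar c) a = a * 2 ^ L.length + bval L := by
  induction L generalizing a with
  | nil => simp [bval]
  | cons c t ih =>
    simp only [List.foldl_cons, List.length_cons]
    rw [ih (2 * a + dchar c)]
    have hb : bval (c :: t) = t.foldl (fun x c => 2 * x + dchar c) (2 * 0 + dchar c) := rfl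
    rw [hb, ih]
    ring

theorem bval_append (X Y : List Char) : bval (X ++ Y) = bval X * 2 ^ Y.length + bval Y := by
  rw [bval, List.foldl_append, foldl_bval]
  rfl

theorem lbN_bits (m : Nat) : IsBits (lbN m) := by
  induction m using lbN.induct with
  | case1 => rw [lbN]; intro c hc; simp at hc
  | case2 m h ih =>
    rw [lbN, if_neg h]
    intro c hc
    rcases List.mem_cons.1 hc with rfl | hc
    · split <;> simp
    · exact ih c hc

theorem bval_bounds (L : List Char) (h : IsBits L) : 0 ≤ bval L ∧ bval L < 2 ^ L.length := by
  induction L with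
  | nil => simp [bval]
  | cons c t ih =>
    have hct := ih (fun x hx => h x (List.mem_cons_of_mem c hx))
    have hc : c = '0' ∨ c = '1' := h c List.mem_cons_self
    have hd : dchar c = 0 ∨ dchar c = 1 := by
      rcases hc with rfl | rfl
      · left; rfl
      · right; rfl
    have : bval (c :: t) = dchar c * 2 ^ t.length + bval t := by
      rw [show c :: t = [c] ++ t from rfl, bval_append]
      congr 1
      · congr 1
        rw [bval, List.foldl_cons]
        simp
    rw [this, List.length_cons, pow_succ]
    rcases hd with hd | hd <;> rw [hd] <;> constructor <;> nlinarith [hct.1, hct.2]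

theorem bval_reverse_lbN (m : Nat) : bval (lbN m).reverse = (m : Int) := by
  induction m using lbN.induct with
  | case1 => rw [lbN]; simp [bval]
  | case2 m h ih =>
    rw [lbN, if_neg h]
    rw [List.reverse_cons, bval_append, ih]
    have hb : bval [if m % 2 = 1 then '1' else '0'] = (m % 2 : Nat) := by
      rcases Nat.mod_two_eq_zero_or_one m with h2 | h2 <;> rw [h2] <;> simp [bval, dchar]
    rw [hb]
    simp only [List.length_cons, List.length_nil]
    omega

theorem dval_nonneg (L : List Char) (h : IsBits L) : 0 ≤ dval L := by
  induction L using List.reverseRecOn with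
  | nil => simp [dval]
  | append_singleton t c ih =>
    have ht := ih (fun x hx => h x (List.mem_append_left _ hx))
    have hc : c = '0' ∨ c = '1' := h c (List.mem_append_right _ List.mem_cons_self)
    rw [dval, List.foldl_append, List.foldl_cons, List.foldl_nil]
    have hd : dchar c = 0 ∨ dchar c = 1 := by
      rcases hc with rfl | rfl
      · left; rfl
      · right; rfl
    rw [show t.foldl (fun x c => 10 * x + dchar c) 0 = dval t from rfl]
    rcases hd with hd | hd <;> rw [hd] <;> omega

theorem pyDigitLoop_eq (R s : Int) (i : Nat) : pyDigitLoop R s i = s + 2 ^ i * gDec R := by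
  induction R, s, i using pyDigitLoop.induct with
  | case1 R s i h ih =>
    rw [pyDigitLoop, if_pos h, ih]
    conv_rhs => rw [gDec, if_pos h]
    ring
  | case2 R s i h =>
    rw [pyDigitLoop, if_neg h]
    conv_rhs => rw [gDec, if_neg h]
    ring

theorem gDec_tenfold (a b : Int) (ha : 0 ≤ a) (hb : b = 0 ∨ b = 1) :
    gDec (10 * a + b) = b + 2 * gDec a := by
  by_cases h : 0 < 10 * a + b
  · rw [gDec, if_pos h]
    have hm : PySem.Int.mod (10 * a + b) 10 = (10 * a + b) % 10 := PySem.Int.mod_eq_emod_of_pos (by norm_num)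
    have hf : PySem.Int.floordiv (10 * a + b) 10 = (10 * a + b) / 10 := PySem.Int.floordiv_eq_ediv_of_pos (by norm_num)
    rw [hm, hf]
    have h1 : (10 * a + b) % 10 = b := by omega
    have h2 : (10 * a + b) / 10 = a := by omega
    rw [h1, h2]
  · have ha0 : a = 0 ∧ b = 0 := by rcases hb with rfl | rfl <;> omega
    rcases ha0 with ⟨rfl, rfl⟩
    norm_num
    rw [gDec]
    norm_num

theorem gDec_dval (L : List Char) (h : IsBits L) : gDec (dval L) = bval L := by
  induction L using List.reverseRecOn with
  | nil =>
    rw [show dval [] = 0 from rfl, gDec]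
    simp [bval]
  | append_singleton t c ih =>
    have hbt : IsBits t := fun x hx => h x (List.mem_append_left _ hx)
    have hc : c = '0' ∨ c = '1' := h c (List.mem_append_right _ List.mem_cons_self)
    have hd : dchar c = 0 ∨ dchar c = 1 := by
      rcases hc with rfl | rfl
      · left; rfl
      · right; rfl
    have hsnoc : dval (t ++ [c]) = 10 * dval t + dchar c := by
      rw [dval, List.foldl_append, List.foldl_cons, List.foldl_nil,
        show t.foldl (fun x c => 10 * x + dchar c) 0 = dval t from rfl]
    rw [hsnoc, gDec_tenfold (dval t) (dchar c) (dval_nonneg t hbt) hd, ih hbt,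
      bval_append]
    simp only [List.length_cons, List.length_nil]
    have hb1 : bval [c] = dchar c := by rw [bval, List.foldl_cons]; simp
    rw [hb1]
    ring

theorem lbN_zero : lbN 0 = [] := by rw [lbN]; simp

theorem parse_getD (L : List Char) (hne : L ≠ []) : (pyParseDigits? L).getD 0 = dval L := by
  rw [pyParseDigits?, if_neg (by simp [hne])]
  rfl

theorem tail_pipeline (L : List Char) (hne : L ≠ []) (h : IsBits L) :
    pyDigitLoop ((pyParseDigits? L).getD 0) 0 0 = bval L := by
  rw [parse_getD L hne, pyDigitLoop_eq, gDec_dval L h]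
  ring

theorem lbN_three : lbN 3 = ['1', '1'] := by
  rw [lbN]; norm_num; rw [lbN]; norm_num; exact lbN_zero

theorem lbN_six : lbN 6 = ['0', '1', '1'] := by
  rw [lbN]; norm_num; exact lbN_three

theorem slice_rev (xs : List Char) : (PySem.List.slice? xs none none (-1)).getD [] = xs.reverse := by
  rw [PySem.List.slice?_none_none_neg_one]
  rfl

theorem F_three : F 3 = 7 := by
  simp only [F]
  rw [pyBinRev_eq, slice_rev]
  rw [show ((3:Int)).toNat = 3 from rfl, lbN_three]
  rw [if_pos (show PySem.Int.mod 3 3 = 0 from by decide)]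
  rw [List.nil_append]
  rw [show ((['1','1'] : List Char).reverse ++
        PySem.List.slice (['1','1'] : List Char).reverse
          (some (((['1','1'] : List Char).reverse.length : Int) - 3))
          (some ((['1','1'] : List Char).reverse.length : Int))) = (['1','1','1'] : List Char) from by decide]
  rw [tail_pipeline (['1','1','1'] : List Char) (by decide) (by intro c hc; simp at hc; subst hc; simp)]
  decide

theorem bitLength_ge_three (N : Int) (h : 4 ≤ N) : min (pyBitLength N) 3 = 3 := by
  rw [pyBitLength, if_neg (by omega)]
  have h4 : 4 ≤ N.natAbs := by omega
  have : 2 ≤ N.natAbs.log2 := (Nat.le_log2 (by omega)).2 (by norm_num; omega)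
  omega

theorem F_eq_main (N : Int) (hpos : 0 < N) (hne3 : N ≠ 3) : F N = F_alt N := by
  have hmod0 : 0 ≤ PySem.Int.mod N 3 := PySem.Int.mod_nonneg N (by norm_num)
  have hmod3 : PySem.Int.mod N 3 < 3 := PySem.Int.mod_lt N (by norm_num)
  have hL : pyBinRev N [] = lbN N.toNat := by rw [pyBinRev_eq]; rfl
  set m := N.toNat with hm
  have hmN : (m : Int) = N := by omega
  set L := (lbN m).reverse with hLdef
  have hLbits : IsBits L := fun c hc => lbN_bits m c (List.mem_reverse.1 hc)
  have hbvalL : bval L = (m : Int) := bval_reverse_lbN m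
  have hLlt : (m : Int) < 2 ^ L.length := by
    rw [← hbvalL]; exact (bval_bounds L hLbits).2
  have h01 : PySem.Int.mod N 3 = 0 ∨ PySem.Int.mod N 3 = 1 ∨ PySem.Int.mod N 3 = 2 := by omega
  rcases h01 with hr | hr | hr
  · -- N % 3 == 0, N > 0, N ≠ 3, so N ≥ 6
    have hN4 : 4 ≤ N := by
      have : (3:Int) ∣ N := (PySem.Int.mod_eq_zero_iff_dvd N 3).1 hr
      omega
    have hm4 : 4 ≤ m := by omega
    have hlen3 : 3 ≤ L.length := by
      by_contra hcon
      have h2 : (2:Int) ^ L.length ≤ 4 := by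
        interval_cases h : L.length <;> norm_num
      omega
    simp only [F, F_alt]
    rw [hL, slice_rev]
    rw [if_pos hr, if_neg (by omega), if_neg (by omega), bitLength_ge_three N hN4]
    have hcast : ((L.length : Int) - 3) = (((L.length - 3 : Nat) : Int)) := by omega
    rw [← hLdef, hcast]
    rw [PySem.List.slice_natCast]
    have htake : L.length - (L.length - 3) = 3 := by omega
    rw [htake]
    have hdl : (L.drop (L.length - 3)).length = 3 := by rw [List.length_drop]; omega
    rw [List.take_of_length_le (by rw [hdl])]
    set S := L.drop (L.length - 3) with hS
    have hSbits : IsBits S := fun c hc => hLbits c (List.mem_of_mem_drop hc)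
    have hTbits : IsBits (L.take (L.length - 3)) := fun c hc => hLbits c (List.mem_of_mem_take hc)
    have hsplit : L.take (L.length - 3) ++ S = L := List.take_append_drop _ _
    have hbsplit : bval L = bval (L.take (L.length - 3)) * 2 ^ 3 + bval S := by
      conv_lhs => rw [← hsplit]
      rw [bval_append, hdl]
    have hSbnd := bval_bounds S hSbits
    rw [hdl] at hSbnd
    have hTbnd := bval_bounds (L.take (L.length - 3)) hTbits
    have hne : L ++ S ≠ [] := by
      intro hcon
      have := congrArg List.length hcon
      simp [hdl] at this
    rw [tail_pipeline (L ++ S) hne (by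
      intro c hc
      rcases List.mem_append.1 hc with hc | hc
      · exact hLbits c hc
      · exact hSbits c hc)]
    rw [bval_append, hdl, hbsplit]
    have hmod8 : PySem.Int.mod N (2 ^ 3) = bval S := by
      have hemod : PySem.Int.mod N 8 = N % 8 := PySem.Int.mod_eq_emod_of_pos (by norm_num)
      have : (m : Int) = bval (L.take (L.length - 3)) * 8 + bval S := by
        rw [← hbvalL, hbsplit]; norm_num
      norm_num [hemod]
      omega
    rw [hmod8]
    have : bval L = N := by rw [hbvalL, hmN]
    rw [hbsplit] at this
    push_cast
    nlinarith [this]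
  · -- N % 3 == 1
    simp only [F, F_alt]
    rw [hL, slice_rev, if_neg (by omega), if_pos hr]
    rw [hr, show (1:Int) * 3 = 3 from by norm_num]
    rw [pyBinRev_eq, slice_rev, List.nil_append]
    rw [show ((3:Int)).toNat = 3 from rfl, lbN_three]
    have hne : L ++ (['1','1'] : List Char).reverse ≠ [] := by simp
    rw [tail_pipeline _ hne (by
      intro c hc
      rcases List.mem_append.1 hc with hc | hc
      · exact hLbits c hc
      · simp at hc; subst hc; simp)]
    rw [bval_append]
    have : bval (['1','1'] : List Char).reverse = 3 := by decide
    rw [this, hbvalL, hmN]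
    norm_num
  · -- N % 3 == 2
    simp only [F, F_alt]
    rw [hL, slice_rev, if_neg (by omega), if_neg (by omega), if_pos hr]
    rw [hr, show (2:Int) * 3 = 6 from by norm_num]
    rw [pyBinRev_eq, slice_rev, List.nil_append]
    rw [show ((6:Int)).toNat = 6 from rfl, lbN_six]
    have hne : L ++ (['0','1','1'] : List Char).reverse ≠ [] := by simp
    rw [tail_pipeline _ hne (by
      intro c hc
      rcases List.mem_append.1 hc with hc | hc
      · exact hLbits c hc
      · simp at hc; rcases hc with rfl | rfl | rfl <;> simp)]
    rw [bval_append]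
    have : bval (['0','1','1'] : List Char).reverse = 6 := by decide
    rw [this, hbvalL, hmN]
    norm_num

-- ===== VERDICT (by name: the statements are the Claim_ definitions above) =====
theorem F_spec : Claim_unchanged_F := by
  intro N _ hpos hnd
  show F N = F_alt N
  exact F_eq_main N hpos (fun h => hnd h)

theorem F_changed : Claim_changed_F := by
  unfold Claim_changed_F
  refine ⟨by decide, by decide, by decide, ?_, by decide, by decide⟩
  exact F_three

theorem F_tight : Claim_exact_F := by
  intro N _ _ hd
  subst hd
  rw [F_three]
  decide
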